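-- pv_equiv track=rewrite | github.com/BiYuanZ/ChatMHYS | chatMHYS/main.py | query_knowledge_base
-- ===== SOURCE A (Python) =====
-- def query_knowledge_base(questions, knowledge):
--     # 将输入的知识文本按行分割
--     lines = knowledge.split('\n')
--     # 初始化输出结果
--     results = []
--
--     for line in lines:
--         # 检查当前行是否以任何一个查询的卦名称开头
--         if any(line.startswith(question) for question in questions):
--             # 直接将匹配到的行添加到结果中
--             results.append(line)
--
--     # 如果没有找到任何匹配的信息，返回一个提示信息
--     if not results:
--         return "No relevant information found."
--     else:
--         # 返回所有匹配到的行
--         return '\n'.join(results)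
-- ===== SOURCE B (Python) =====
-- def query_knowledge_base(questions, knowledge):
--     # Alternative algorithm: set of questions + probe each prefix of a line up to the
--     # longest question length, instead of testing every question against every line.
--     qset = set(questions)
--     maxlen = max(map(len, questions), default=0)
--     results = []
--     for line in knowledge.split('\n'):
--         limit = min(len(line), maxlen)
--         if any(line[:k] in qset for k in range(limit + 1)):
--             results.append(line)
--     return '\n'.join(results) if results else "No relevant information found."
-- ===== Notes on version B (the rewrite author's own statement) =====
-- stated objective: alternative
-- what changed: Instead of testing every question against every line with startswith, B builds a set of the questions once and, per line, probes each of the line's prefixes up to the longest question length for set membership; cost no longer scales with the number of questions per line, but prefix hashing adds a per-line factor of the longest question length.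
import Mathlib
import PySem

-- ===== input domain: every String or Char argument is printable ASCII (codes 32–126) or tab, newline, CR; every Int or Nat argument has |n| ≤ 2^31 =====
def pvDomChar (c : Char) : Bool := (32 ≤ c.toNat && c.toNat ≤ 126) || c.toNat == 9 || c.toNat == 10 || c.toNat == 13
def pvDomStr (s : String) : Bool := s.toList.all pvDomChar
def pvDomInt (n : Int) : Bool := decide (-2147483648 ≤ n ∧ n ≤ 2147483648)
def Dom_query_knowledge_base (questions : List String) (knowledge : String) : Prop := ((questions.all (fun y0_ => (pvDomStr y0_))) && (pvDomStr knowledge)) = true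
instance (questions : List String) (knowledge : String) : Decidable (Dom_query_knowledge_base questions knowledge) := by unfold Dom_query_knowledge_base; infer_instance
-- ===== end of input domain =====

-- B replaces the per-line scan over all questions by one question set probed at each of
-- the line's prefixes up to the longest question length (alternative algorithm, same result).

-- ===== PORT A =====
-- knowledge.split('\n'): sep is the nonempty literal "\n", so split? is always `some`;
-- `.getD []` only unwraps it.
def query_knowledge_base (questions : List String) (knowledge : String) : String :=
  let lines := (PySem.Str.split? knowledge "\n").getD []
  let results := lines.foldl (fun acc line =>
    if questions.any (fun question => PySem.Str.startswith line question)
    then acc ++ [line] else acc) []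
  if results = [] then "No relevant information found."
  else PySem.Str.join "\n" results

-- ===== PORT B =====
def query_knowledge_base_alt (questions : List String) (knowledge : String) : String :=
  let qset : PySem.Set String := PySem.Set.ofList questions
  let maxlen : Int := (questions.map PySem.Str.len).foldl max 0
  let results := ((PySem.Str.split? knowledge "\n").getD []).foldl (fun acc line =>
    let limit := min (PySem.Str.len line) maxlen
    if (PySem.List.pyRange 0 (limit + 1) 1).any
         (fun k => PySem.Set.contains qset (PySem.Str.slice line none (some k)))
    then acc ++ [line] else acc) []
  if results = [] then "No relevant information found."
  else PySem.Str.join "\n" results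

-- ===== PRECONDITION & SPEC =====
def Spec_query_knowledge_base (questions : List String) (knowledge : String) (out : String) : Prop := out = query_knowledge_base_alt questions knowledge
instance (questions : List String) (knowledge : String) (out : String) : Decidable (Spec_query_knowledge_base questions knowledge out) := by unfold Spec_query_knowledge_base; infer_instance

-- ===== CLAIM (what is proved, stated in full; the proofs are below) =====
def Claim_equal_query_knowledge_base : Prop := ∀ (questions : List String) (knowledge : String), Dom_query_knowledge_base questions knowledge → Spec_query_knowledge_base questions knowledge (query_knowledge_base questions knowledge)

-- ===== LEMMAS AND PROOFS =====

-- The two per-line tests agree: some question is a prefix of the line iff some prefix of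
-- the line (of length at most the longest question) is in the question set.
lemma pred_eq (questions : List String) (line : String) :
    (questions.any (fun question => PySem.Str.startswith line question))
    = ((PySem.List.pyRange 0 (min (PySem.Str.len line) ((questions.map PySem.Str.len).foldl max 0) + 1) 1).any
        (fun k => PySem.Set.contains (PySem.Set.ofList questions) (PySem.Str.slice line none (some k)))) := by
  rw [Bool.eq_iff_iff]
  simp only [List.any_eq_true, PySem.Str.startswith_eq, PySem.Chars.startswith_iff,
    PySem.Set.contains_iff, PySem.Set.mem_ofList, PySem.List.mem_pyRange_one]
  constructor
  · rintro ⟨q, hq, hpre⟩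
    refine ⟨(q.toList.length : Int), ⟨by positivity, ?_⟩, ?_⟩
    · have h1 : (PySem.Str.len q) ≤ (questions.map PySem.Str.len).foldl max 0 :=
        (PySem.List.le_foldl_max (questions.map PySem.Str.len) 0).2 _
          (List.mem_map_of_mem hq)
      have h2 : q.toList.length ≤ line.toList.length := hpre.length_le
      simp only [PySem.Str.len_eq] at h1 ⊢
      omega
    · have hsl : (PySem.Str.slice line none (some (q.toList.length : Int))).toList = q.toList := by
        rw [PySem.Str.toList_slice]
        simp only [PySem.Chars.slice]
        rw [PySem.List.slice_to_natCast]
        exact (List.prefix_iff_eq_take.mp hpre).symm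
      have heq := String.toList_inj.mp hsl
      rw [heq]
      exact hq
  · rintro ⟨k, ⟨hk0, _⟩, hmem⟩
    refine ⟨_, hmem, ?_⟩
    rw [PySem.Str.toList_slice]
    simp only [PySem.Chars.slice]
    have : k = ((k.toNat : Nat) : Int) := by omega
    rw [this, PySem.List.slice_to_natCast]
    exact List.take_prefix _ _

-- ===== VERDICT (by name: the statement is the Claim_ definition above) =====
theorem query_knowledge_base_spec : Claim_equal_query_knowledge_base := by
  intro questions knowledge _
  unfold Spec_query_knowledge_base query_knowledge_base query_knowledge_base_alt
  simp only [pred_eq questions]
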